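-- pv_equiv track=rewrite | github.com/Thestartofyou/week-dominant-e | main - 2024-02-16T211417.518.py | find_weak_dominant_strategy
-- ===== SOURCE A (Python) =====
-- def find_weak_dominant_strategy(matrix):
--     """
--     Find weak dominant strategy for a player in a given payoff matrix.
--
--     Parameters:
--     matrix (list of lists): Payoff matrix representing the game.
--
--     Returns:
--     int or None: Index of the weak dominant strategy for the player, or None if no weak dominant strategy exists.
--     """
--     num_strategies = len(matrix)
--     for i in range(num_strategies):
--         is_weak_dominant = True
--         for j in range(num_strategies):
--             if matrix[i] < matrix[j] and i != j:  # Check if strategy i is weakly dominated by strategy j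
--                 is_weak_dominant = False
--                 break
--         if is_weak_dominant:
--             return i
--     return None
-- ===== SOURCE B (Python) =====
-- def find_weak_dominant_strategy(matrix):
--     # single pass: track the lexicographically largest row seen so far and its
--     # first index; that index is the first row not dominated by any other row
--     if not matrix:
--         return None
--     best_i, best = 0, matrix[0]
--     for i, row in enumerate(matrix[1:], 1):
--         if best < row:
--             best_i, best = i, row
--     return best_i
-- ===== Notes on version B (the rewrite author's own statement) =====
-- stated objective: alternative
-- what changed: Replaces the nested all-pairs dominance scan with a single pass that tracks the lexicographically maximal row and its first index, which is exactly the first undominated row.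
import Mathlib
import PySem

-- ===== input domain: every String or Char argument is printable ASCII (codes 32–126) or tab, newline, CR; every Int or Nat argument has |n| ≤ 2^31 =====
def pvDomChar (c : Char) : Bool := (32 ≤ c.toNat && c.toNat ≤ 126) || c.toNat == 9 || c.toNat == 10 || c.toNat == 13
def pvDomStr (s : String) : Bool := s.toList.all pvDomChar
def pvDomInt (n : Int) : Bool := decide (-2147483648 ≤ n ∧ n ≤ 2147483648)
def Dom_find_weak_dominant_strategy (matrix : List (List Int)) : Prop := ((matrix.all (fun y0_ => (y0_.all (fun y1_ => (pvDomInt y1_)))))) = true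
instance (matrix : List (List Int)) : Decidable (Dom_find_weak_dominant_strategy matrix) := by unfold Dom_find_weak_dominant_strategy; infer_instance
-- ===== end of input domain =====

-- B replaces A's nested all-pairs dominance scan with a single pass that tracks the lexicographically
-- maximal row and its first index (a genuinely different, simpler traversal; same measured cost).


-- ===== PORT A =====
-- Python's `<` on list[int] (lexicographic, shorter strict prefix is smaller): exact hand port.
def pvLexLt : List Int → List Int → Bool
  | _, [] => false
  | [], _ :: _ => true
  | a :: as, b :: bs => a < b || (a == b && pvLexLt as bs)

def find_weak_dominant_strategy (matrix : List (List Int)) : Option Int :=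
  let n : Int := matrix.length
  (PySem.List.pyRange 0 n 1).find? (fun i =>
    (PySem.List.pyRange 0 n 1).all (fun j =>
      !(pvLexLt (PySem.List.pyGetD matrix i []) (PySem.List.pyGetD matrix j []) && i != j)))

-- ===== PORT B =====
def find_weak_dominant_strategy_alt (matrix : List (List Int)) : Option Int :=
  match matrix with
  | [] => none
  | r :: rs =>
    let st := (PySem.List.enumerate rs 1).foldl
      (fun (acc : Int × List Int) p => if pvLexLt acc.2 p.2 then (p.1, p.2) else acc)
      ((0 : Int), r)
    some st.1

-- ===== PRECONDITION & SPEC =====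
def Spec_find_weak_dominant_strategy (matrix : List (List Int)) (out : Option Int) : Prop := out = find_weak_dominant_strategy_alt matrix
instance (matrix : List (List Int)) (out : Option Int) : Decidable (Spec_find_weak_dominant_strategy matrix out) := by unfold Spec_find_weak_dominant_strategy; infer_instance

-- ===== CLAIM (what is proved, stated in full; the proofs are below) =====
def Claim_equal_find_weak_dominant_strategy : Prop := ∀ (matrix : List (List Int)), Dom_find_weak_dominant_strategy matrix → Spec_find_weak_dominant_strategy matrix (find_weak_dominant_strategy matrix)

-- ===== LEMMAS AND PROOFS =====

theorem pvLexLt_irrefl : ∀ a : List Int, pvLexLt a a = false := by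
  intro a; induction a with
  | nil => rfl
  | cons x xs ih => simp [pvLexLt, ih]

theorem pvLexLt_trans : ∀ a b c : List Int, pvLexLt a b = true → pvLexLt b c = true → pvLexLt a c = true := by
  intro a
  induction a with
  | nil =>
    intro b c hab hbc
    cases b with
    | nil => simp [pvLexLt] at hab
    | cons y ys =>
      cases c with
      | nil => simp [pvLexLt] at hbc
      | cons z zs => simp [pvLexLt]
  | cons x xs ih =>
    intro b c hab hbc
    cases b with
    | nil => simp [pvLexLt] at hab
    | cons y ys =>
      cases c with
      | nil => simp [pvLexLt] at hbc
      | cons z zs =>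
        simp [pvLexLt] at hab hbc ⊢
        rcases hab with h1 | ⟨hxy, h1⟩
        · rcases hbc with h2 | ⟨hyz, h2⟩
          · exact Or.inl (lt_trans h1 h2)
          · exact Or.inl (hyz ▸ h1)
        · rcases hbc with h2 | ⟨hyz, h2⟩
          · exact Or.inl (hxy ▸ h2)
          · exact Or.inr ⟨hxy.trans hyz, ih ys zs h1 h2⟩

theorem pvLexLt_total : ∀ a b : List Int, pvLexLt a b = false → pvLexLt b a = false → a = b := by
  intro a
  induction a with
  | nil =>
    intro b hab _
    cases b with
    | nil => rfl
    | cons y ys => simp [pvLexLt] at hab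
  | cons x xs ih =>
    intro b hab hba
    cases b with
    | nil => simp [pvLexLt] at hba
    | cons y ys =>
      simp [pvLexLt] at hab hba
      have hxy : x = y := by omega
      subst hxy
      have := ih ys (hab.2 rfl) (hba.2 rfl)
      rw [this]

-- `Good L k`: row k is a lexicographic maximum of L and every earlier row is strictly smaller
-- (i.e. k is the first undominated index).
def Good (L : List (List Int)) (k : Nat) : Prop :=
  k < L.length ∧ (∀ r ∈ L, pvLexLt (L.getD k []) r = false) ∧
    (∀ j < k, pvLexLt (L.getD j []) (L.getD k []) = true)

theorem getD_mem {α : Type} (L : List α) (k : Nat) (d : α) (h : k < L.length) : L.getD k d ∈ L := by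
  rw [List.getD, List.getElem?_eq_getElem h]
  exact List.getElem_mem h

theorem getD_append_left {α : Type} (xs ys : List α) (k : Nat) (h : k < xs.length) (d : α) :
    (xs ++ ys).getD k d = xs.getD k d := by
  simp [List.getD, List.getElem?_append_left h]

theorem fold_good : ∀ (rs pre : List (List Int)) (bi : Nat), Good pre bi →
    ∃ k : Nat,
      ((PySem.List.enumerate rs (pre.length)).foldl
        (fun (acc : Int × List Int) p => if pvLexLt acc.2 p.2 then (p.1, p.2) else acc)
        ((bi : Int), pre.getD bi [])) = ((k : Int), (pre ++ rs).getD k []) ∧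
      Good (pre ++ rs) k := by
  intro rs
  induction rs with
  | nil =>
    intro pre bi hg
    exact ⟨bi, by simp [PySem.List.enumerate_nil], by simpa using hg⟩
  | cons r rs ih =>
    intro pre bi hg
    obtain ⟨hbi, hmax, hfirst⟩ := hg
    rw [PySem.List.enumerate_cons]
    simp only [List.foldl_cons]
    by_cases hlt : pvLexLt (pre.getD bi []) r = true
    · rw [if_pos hlt]
      have hg' : Good (pre ++ [r]) pre.length := by
        refine ⟨by simp, ?_, ?_⟩
        · intro x hx
          have hkget : (pre ++ [r]).getD pre.length [] = r := by
            simp [List.getD]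
          rw [hkget]
          rcases List.mem_append.mp hx with hx | hx
          · -- x ∈ pre, so pvLexLt best x = false; if pvLexLt r x then best < r < ... contradiction
            by_contra hc
            have hrx : pvLexLt r x = true := by
              cases h : pvLexLt r x with
              | true => rfl
              | false => exact absurd h hc
            have h3 := pvLexLt_trans _ _ _ hlt hrx
            have h4 := hmax x hx
            rw [h3] at h4
            cases h4
          · simp at hx; subst hx; exact pvLexLt_irrefl _
        · intro j hj
          have hjget : (pre ++ [r]).getD j [] = pre.getD j [] := getD_append_left _ _ _ hj _
          have hkget : (pre ++ [r]).getD pre.length [] = r := by simp [List.getD]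
          rw [hjget, hkget]
          by_cases hjb : pvLexLt (pre.getD j []) (pre.getD bi []) = true
          · exact pvLexLt_trans _ _ _ hjb hlt
          · have heq : pre.getD j [] = pre.getD bi [] := by
              apply pvLexLt_total
              · exact Bool.eq_false_iff.mpr hjb
              · exact hmax _ (getD_mem _ _ _ hj)
            rw [heq]; exact hlt
      obtain ⟨k, hk, hgk⟩ := ih (pre ++ [r]) pre.length hg'
      have hr2 : (pre ++ [r]).getD pre.length [] = r := by simp [List.getD]
      rw [hr2] at hk
      have hlen : ((pre ++ [r]).length : Int) = (pre.length : Int) + 1 := by simp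
      rw [hlen] at hk
      refine ⟨k, ?_, by simpa [List.append_assoc] using hgk⟩
      rw [hk]
      simp [List.append_assoc]
    · rw [if_neg hlt]
      have hlt' : pvLexLt (pre.getD bi []) r = false := Bool.eq_false_iff.mpr hlt
      have hg' : Good (pre ++ [r]) bi := by
        have hbget : (pre ++ [r]).getD bi [] = pre.getD bi [] := getD_append_left _ _ _ hbi _
        refine ⟨by simp; omega, ?_, ?_⟩
        · intro x hx
          rw [hbget]
          rcases List.mem_append.mp hx with hx | hx
          · exact hmax x hx
          · simp at hx; subst hx; exact hlt'
        · intro j hj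
          rw [hbget, getD_append_left _ _ _ (lt_trans hj hbi) _]
          exact hfirst j hj
      obtain ⟨k, hk, hgk⟩ := ih (pre ++ [r]) bi hg'
      have hb2 : (pre ++ [r]).getD bi [] = pre.getD bi [] := getD_append_left _ _ _ hbi _
      rw [hb2] at hk
      have hlen : ((pre ++ [r]).length : Int) = (pre.length : Int) + 1 := by simp
      rw [hlen] at hk
      refine ⟨k, ?_, by simpa [List.append_assoc] using hgk⟩
      rw [hk]
      simp [List.append_assoc]

theorem alt_good (r : List Int) (rs : List (List Int)) :
    ∃ k : Nat, find_weak_dominant_strategy_alt (r :: rs) = some (k : Int) ∧ Good (r :: rs) k := by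
  have hg : Good [r] 0 := by
    refine ⟨by simp, ?_, by intro j hj; omega⟩
    intro x hx; simp at hx; subst hx; exact pvLexLt_irrefl _
  obtain ⟨k, hk, hgk⟩ := fold_good rs [r] 0 hg
  refine ⟨k, ?_, by simpa using hgk⟩
  simp only [find_weak_dominant_strategy_alt]
  have h1 : (([r] : List (List Int)).length : Int) = 1 := by simp
  have h2 : ([r] : List (List Int)).getD 0 [] = r := rfl
  have h3 : (((0 : Nat) : Int)) = (0 : Int) := by simp
  rw [h1, h2, h3] at hk
  rw [hk]

theorem find?_range_eq_some (n k : Nat) (q : Nat → Bool) (hk : k < n) (hq : q k = true)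
    (hbefore : ∀ j < k, q j = false) : (List.range n).find? q = some k := by
  have hn : n = k + (n - k) := by omega
  obtain ⟨m, hm⟩ : ∃ m, n - k = m + 1 := ⟨n - k - 1, by omega⟩
  rw [hn, hm, List.range_add, List.find?_append]
  have h1 : (List.range k).find? q = none := by
    rw [List.find?_eq_none]
    intro x hx
    simp [hbefore x (List.mem_range.mp hx)]
  rw [h1]
  rw [List.range_succ_eq_map, List.map_cons]
  simp [hq]

-- A's inner `all` over the index range, rephrased: row i is undominated.
theorem predA_true_iff (L : List (List Int)) (i : Nat) (_hi : i < L.length) :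
    (((List.range L.length).map (fun j : Nat => (j : Int))).all (fun j =>
      !(pvLexLt (PySem.List.pyGetD L (i : Int) []) (PySem.List.pyGetD L j []) && (i : Int) != j))) = true
    ↔ (∀ r ∈ L, pvLexLt (L.getD i []) r = false) := by
  rw [List.all_eq_true]
  constructor
  · intro h r hr
    obtain ⟨j, hj, hjr⟩ := List.getElem_of_mem hr
    have hmem : (j : Int) ∈ (List.range L.length).map (fun j : Nat => (j : Int)) :=
      List.mem_map.mpr ⟨j, List.mem_range.mpr hj, rfl⟩
    have hj' := h _ hmem
    have hgetj : L.getD j [] = r := by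
      simp [List.getD, List.getElem?_eq_getElem hj, hjr]
    by_cases hij : i = j
    · subst hij
      rw [hgetj]
      exact pvLexLt_irrefl r
    · have hne : ((i : Int) != (j : Int)) = true := by
        simp; omega
      simp only [PySem.List.pyGetD_natCast, hne, Bool.and_true, Bool.not_eq_eq_eq_not,
        Bool.not_true] at hj'
      rwa [hgetj] at hj'
  · intro h j hjmem
    obtain ⟨m, hm, rfl⟩ := List.mem_map.mp hjmem
    have hm' := List.mem_range.mp hm
    have h1 : pvLexLt (L[i]?.getD []) (L[m]?.getD []) = false := by
      simpa [List.getD] using h _ (getD_mem L m ([] : List Int) hm')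
    simp [PySem.List.pyGetD_natCast, List.getD, h1]

theorem A_from_good (L : List (List Int)) (k : Nat) (hg : Good L k) :
    find_weak_dominant_strategy L = some (k : Int) := by
  obtain ⟨hk, hmax, hfirst⟩ := hg
  simp only [find_weak_dominant_strategy]
  have hrange : PySem.List.pyRange 0 (L.length : Int) 1 =
      (List.range L.length).map (fun j : Nat => (j : Int)) := by
    rw [PySem.List.pyRange_one]
    simp
  rw [hrange, List.find?_map]
  have hfind : (List.range L.length).find?
      ((fun i => ((List.range L.length).map (fun j : Nat => (j : Int))).all fun j =>
        !(pvLexLt (PySem.List.pyGetD L i []) (PySem.List.pyGetD L j []) && i != j)) ∘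
        (fun j : Nat => (j : Int))) = some k := by
    apply find?_range_eq_some _ _ _ hk
    · exact (predA_true_iff L k hk).mpr hmax
    · intro j hj
      rw [Bool.eq_false_iff]
      intro hptrue
      have hund := (predA_true_iff L j (lt_trans hj hk)).mp hptrue
      have h2 := hund _ (getD_mem L k ([] : List Int) hk)
      rw [hfirst j hj] at h2
      cases h2
  rw [hfind]
  rfl

-- ===== VERDICT (by name: the statement is the Claim_ definition above) =====
theorem find_weak_dominant_strategy_spec : Claim_equal_find_weak_dominant_strategy := by
  intro matrix _
  unfold Spec_find_weak_dominant_strategy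
  cases matrix with
  | nil => rfl
  | cons r rs =>
    obtain ⟨k, hk, hgk⟩ := alt_good r rs
    rw [hk, A_from_good _ _ hgk]
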